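-- pv_equiv track=rewrite | github.com/Billychen7/UCLA-CS-131 | Project/server.py | separate_lat_and_long
-- ===== SOURCE A (Python) =====
-- def separate_lat_and_long(coordinates):
--     positions_of_signs = []
--     for i in range(len(coordinates)):
--         # if the current character is a sign
--         if coordinates[i] == '+' or coordinates[i] == '-':
--             positions_of_signs.append(i)
--
--     # there should only be 2 signs
--     if len(positions_of_signs) != 2:
--         return None
--
--     # one of the signs should be at the beginning, and no signs should be at the end
--     if 0 not in positions_of_signs or (len(coordinates) - 1) in positions_of_signs:
--         return None
--
--     latitude = coordinates[positions_of_signs[0]:positions_of_signs[1]]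
--     longitude = coordinates[positions_of_signs[1]:]
--
--     return (latitude,longitude)
-- ===== SOURCE B (Python) =====
-- def separate_lat_and_long(coordinates):
--     # single forward scan: leading sign, then take-while-non-sign to find the
--     # second sign, then require a nonempty sign-free tail after it
--     if not coordinates or coordinates[0] not in '+-':
--         return None
--     rest = coordinates[1:]
--     k = 0
--     while k < len(rest) and rest[k] not in '+-':
--         k += 1
--     lon = rest[k:]
--     if len(lon) < 2 or any(c in '+-' for c in lon[1:]):
--         return None
--     return (coordinates[:k + 1], lon)
-- ===== Notes on version B (the rewrite author's own statement) =====
-- stated objective: faster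
-- what changed: Instead of collecting every sign position into a list and then validating it with membership/length checks, B scans forward once: it requires a leading sign, counts leading non-sign characters of the tail to locate the second sign, and requires a nonempty sign-free remainder, exiting early on failure.
import Mathlib
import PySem

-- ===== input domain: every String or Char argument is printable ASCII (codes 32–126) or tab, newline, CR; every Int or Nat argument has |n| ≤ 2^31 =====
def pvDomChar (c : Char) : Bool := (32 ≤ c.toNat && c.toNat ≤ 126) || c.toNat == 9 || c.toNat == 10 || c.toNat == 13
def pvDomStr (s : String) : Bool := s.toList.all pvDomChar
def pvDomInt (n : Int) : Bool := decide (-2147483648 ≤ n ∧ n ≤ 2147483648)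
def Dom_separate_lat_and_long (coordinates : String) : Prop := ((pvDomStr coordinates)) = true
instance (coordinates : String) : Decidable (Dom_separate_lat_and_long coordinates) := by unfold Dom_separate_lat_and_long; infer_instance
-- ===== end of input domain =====

-- B replaces A's collect-all-sign-positions pass plus membership checks by one forward
-- take-while scan with early exits (objective: faster by a constant factor, as measured).

-- ===== PORT A =====
def separate_lat_and_long (coordinates : String) : Option (String × String) :=
  let l := coordinates.toList
  let positions : List Int :=
    (PySem.List.pyRange 0 (l.length : Int) 1).foldl
      (fun acc i =>
        if PySem.List.pyGetD l i ' ' == '+' || PySem.List.pyGetD l i ' ' == '-' then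
          acc ++ [i] else acc) []
  if positions.length ≠ 2 then none
  else if (0 : Int) ∉ positions ∨ ((l.length : Int) - 1) ∈ positions then none
  else
    let p0 := PySem.List.pyGetD positions 0 0
    let p1 := PySem.List.pyGetD positions 1 0
    some (String.ofList (PySem.List.slice l (some p0) (some p1)),
          String.ofList (PySem.List.slice l (some p1) none))

-- ===== PORT B =====
-- B's while loop: number of leading non-sign characters
def pvScanNonSign : List Char → Nat
  | [] => 0
  | c :: t => if c == '+' || c == '-' then 0 else pvScanNonSign t + 1

def separate_lat_and_long_alt (coordinates : String) : Option (String × String) :=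
  match coordinates.toList with
  | [] => none
  | c :: rest =>
    if !(c == '+' || c == '-') then none
    else
      let k := pvScanNonSign rest
      let lon := rest.drop k
      if lon.length < 2 ∨ (lon.drop 1).any (fun d => d == '+' || d == '-') then none
      else some (String.ofList ((c :: rest).take (k + 1)), String.ofList lon)

-- ===== PRECONDITION & SPEC =====
def Spec_separate_lat_and_long (coordinates : String) (out : Option (String × String)) : Prop := out = separate_lat_and_long_alt coordinates
instance (coordinates : String) (out : Option (String × String)) : Decidable (Spec_separate_lat_and_long coordinates out) := by unfold Spec_separate_lat_and_long; infer_instance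

-- ===== CLAIM (what is proved, stated in full; the proofs are below) =====
def Claim_equal_separate_lat_and_long : Prop := ∀ (coordinates : String), Dom_separate_lat_and_long coordinates → Spec_separate_lat_and_long coordinates (separate_lat_and_long coordinates)

-- ===== LEMMAS AND PROOFS =====
def pvIsSign (c : Char) : Bool := c == '+' || c == '-'

-- sign positions of a char list, recursively (proof-side mirror of A's index scan)
def pvF : List Char → List Nat
  | [] => []
  | c :: t => if pvIsSign c then 0 :: (pvF t).map (· + 1) else (pvF t).map (· + 1)

lemma pvFilter_range_eq_F (l : List Char) :
    (List.range l.length).filter (fun k => pvIsSign (l.getD k ' ')) = pvF l := by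
  induction l with
  | nil => simp [pvF]
  | cons c t ih =>
    rw [List.length_cons, List.range_succ_eq_map, List.filter_cons]
    rw [List.filter_map]
    simp only [Function.comp_def, List.getD_cons_succ, Nat.succ_eq_add_one]
    rw [ih]
    by_cases h : pvIsSign c <;> simp [pvF, h]

lemma pvPositionsA (l : List Char) :
    (PySem.List.pyRange 0 (l.length : Int) 1).foldl
      (fun acc i =>
        if PySem.List.pyGetD l i ' ' == '+' || PySem.List.pyGetD l i ' ' == '-' then
          acc ++ [i] else acc) []
    = (pvF l).map (fun k : Nat => (k : Int)) := by
  have h1 : PySem.List.pyRange 0 (l.length : Int) 1 = (List.range l.length).map (fun k : Nat => (k : Int)) := by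
    exact_mod_cast PySem.List.pyRange_zero_natCast l.length
  rw [h1, List.foldl_map]
  simp only [PySem.List.pyGetD_natCast]
  rw [PySem.List.foldl_append_if (fun k : Nat => (l.getD k ' ' == '+' || l.getD k ' ' == '-')) (fun k : Nat => (k : Int)) (List.range l.length) []]
  rw [show (fun k : Nat => (l.getD k ' ' == '+' || l.getD k ' ' == '-')) = (fun k => pvIsSign (l.getD k ' ')) from rfl, pvFilter_range_eq_F]
  rfl

lemma pvF_nil_iff (t : List Char) : pvF t = [] ↔ t.any pvIsSign = false := by
  induction t with
  | nil => simp [pvF]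
  | cons c t ih =>
    by_cases h : pvIsSign c <;> simp [pvF, h, ih]

lemma pvScan_of_no_sign (t : List Char) (h : pvF t = []) : pvScanNonSign t = t.length := by
  induction t with
  | nil => simp [pvScanNonSign]
  | cons c t ih =>
    by_cases hc : pvIsSign c
    · simp [pvF, hc] at h
    · have hc' : (c == '+' || c == '-') = false := by simpa [pvIsSign] using hc
      simp [pvF, hc] at h
      simp [pvScanNonSign, hc', ih h]

lemma pvF_cons_char (t : List Char) (j : Nat) (js : List Nat) (h : pvF t = j :: js) :
    j = pvScanNonSign t ∧ j < t.length ∧ js = (pvF (t.drop (j + 1))).map (· + (j + 1)) := by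
  induction t generalizing j js with
  | nil => simp [pvF] at h
  | cons c t ih =>
    by_cases hc : pvIsSign c
    · have hc' : (c == '+' || c == '-') = true := hc
      simp only [pvF, hc, if_pos] at h
      injection h with h1 h2
      subst h1
      refine ⟨by simp [pvScanNonSign, hc'], by simp, ?_⟩
      simp [← h2]
    · have hc' : (c == '+' || c == '-') = false := by simpa [pvIsSign] using hc
      simp only [pvF, hc] at h
      cases hF : pvF t with
      | nil => rw [hF] at h; simp at h
      | cons j' js' =>
        rw [hF] at h
        simp only [List.map_cons] at h
        injection h with h1 h2
        obtain ⟨e1, e2, e3⟩ := ih j' js' hF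
        subst h1 h2
        refine ⟨by simp [pvScanNonSign, hc', e1], by simpa using e2, ?_⟩
        rw [e3, List.map_map]
        have hd : (c :: t).drop (j' + 1 + 1) = t.drop (j' + 1) := by simp
        rw [hd]
        apply List.map_congr_left
        intro x _
        simp [Function.comp]
        omega

lemma pvMain (l : List Char) :
    (let positions : List Int :=
      (PySem.List.pyRange 0 (l.length : Int) 1).foldl
        (fun acc i =>
          if PySem.List.pyGetD l i ' ' == '+' || PySem.List.pyGetD l i ' ' == '-' then
            acc ++ [i] else acc) [];
    if positions.length ≠ 2 then none
    else if (0 : Int) ∉ positions ∨ ((l.length : Int) - 1) ∈ positions then none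
    else
      let p0 := PySem.List.pyGetD positions 0 0
      let p1 := PySem.List.pyGetD positions 1 0
      some (String.ofList (PySem.List.slice l (some p0) (some p1)),
            String.ofList (PySem.List.slice l (some p1) none)))
    = (match l with
      | [] => none
      | c :: rest =>
        if !(c == '+' || c == '-') then none
        else
          let k := pvScanNonSign rest
          let lon := rest.drop k
          if lon.length < 2 ∨ (lon.drop 1).any (fun d => d == '+' || d == '-') then none
          else some (String.ofList ((c :: rest).take (k + 1)), String.ofList lon)) := by
  simp only [pvPositionsA]
  cases l with
  | nil => simp [pvF]
  | cons c rest =>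
    by_cases hc : pvIsSign c
    · have hc' : (c == '+' || c == '-') = true := hc
      simp only [pvF, hc, if_pos, hc', Bool.not_true, Bool.false_eq_true, if_false]
      cases hF : pvF rest with
      | nil =>
        have hk : pvScanNonSign rest = rest.length := pvScan_of_no_sign rest hF
        simp [hk]
      | cons j js =>
        obtain ⟨e1, e2, e3⟩ := pvF_cons_char rest j js hF
        have hdd : List.drop 1 (List.drop j rest) = rest.drop (j + 1) := by
          rw [List.drop_drop]
        cases js with
        | cons j2 js2 =>
          rw [if_pos (by simp)]
          have hne : pvF (rest.drop (j + 1)) ≠ [] := by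
            intro h0; rw [h0] at e3; simp at e3
          have hany : (rest.drop (j + 1)).any (fun d => d == '+' || d == '-') = true := by
            rcases h : (rest.drop (j + 1)).any pvIsSign with _ | _
            · exact absurd ((pvF_nil_iff _).2 h) hne
            · simpa [pvIsSign] using h
          rw [← e1, hdd, hany]
          simp
        | nil =>
          rw [if_neg (by simp)]
          rw [← e1]
          by_cases hend : rest.length = j + 1
          · have hmem : ((((c :: rest).length : Int)) - 1) ∈
                ([((0:Nat):Int)] ++ (List.map (fun x => x + 1) [j]).map (fun k : Nat => (k : Int))) := by
              simp [hend]
            rw [if_pos (Or.inr (by simpa using hmem))]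
            have h1 : (rest.drop j).length = 1 := by
              rw [List.length_drop]; omega
            rw [if_pos (Or.inl (by omega))]
          · have hmem : ¬ ((0 : Int) ∉
                (List.map (fun k : Nat => (k : Int)) (0 :: List.map (fun x => x + 1) [j])) ∨
                (((c :: rest).length : Int) - 1) ∈
                  (List.map (fun k : Nat => (k : Int)) (0 :: List.map (fun x => x + 1) [j]))) := by
              push_neg
              refine ⟨by simp, ?_⟩
              simp only [List.map_cons, List.map_nil, List.length_cons, List.mem_cons,
                List.not_mem_nil, or_false]
              push_cast
              omega
            rw [if_neg hmem]
            have hlon : ¬ ((rest.drop j).length < 2 ∨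
                ((rest.drop j).drop 1).any (fun d => d == '+' || d == '-') = true) := by
              push_neg
              constructor
              · rw [List.length_drop]; omega
              · have hFnil : pvF (rest.drop (j + 1)) = [] := by
                  rcases h0 : pvF (rest.drop (j + 1)) with _ | ⟨a, b⟩
                  · rfl
                  · rw [h0] at e3; simp at e3
                have := (pvF_nil_iff _).1 hFnil
                rw [hdd]
                simpa [pvIsSign] using this
            rw [if_neg hlon]
            have hp0 : PySem.List.pyGetD
                (List.map (fun k : Nat => (k : Int)) (0 :: List.map (fun x => x + 1) [j])) 0 0
                = ((0:Nat) : Int) := by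
              simp [PySem.List.pyGetD_zero_cons]
            have hp1 : PySem.List.pyGetD
                (List.map (fun k : Nat => (k : Int)) (0 :: List.map (fun x => x + 1) [j])) 1 0
                = ((j + 1 : Nat) : Int) := by
              simp [PySem.List.pyGetD_ofNat']
            rw [hp0, hp1]
            rw [Nat.cast_zero, PySem.List.slice_zero_start, PySem.List.slice_to_natCast,
              PySem.List.slice_from_natCast]
            rw [List.drop_succ_cons]
    · have hc' : (c == '+' || c == '-') = false := by simpa [pvIsSign] using hc
      simp only [pvF, hc, if_false, hc', Bool.not_false, if_true, Bool.false_eq_true]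
      by_cases hlen : (pvF rest).length = 2
      · rw [if_neg (by simp [hlen])]
        rw [if_pos]
        left
        simp only [List.mem_map]
        rintro ⟨a, ⟨b, hb, rfl⟩, hax⟩
        have : ((b + 1 : Nat) : Int) ≠ 0 := by push_cast; omega
        exact this hax
      · rw [if_pos (by simp [hlen])]

-- ===== VERDICT (by name: the statement is the Claim_ definition above) =====
theorem separate_lat_and_long_spec : Claim_equal_separate_lat_and_long := by
  intro coordinates _
  unfold Spec_separate_lat_and_long separate_lat_and_long separate_lat_and_long_alt
  exact pvMain coordinates.toList
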